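-- pv_equiv track=rewrite | github.com/rslabon/aoc2019 | day8.py | create_layers
-- ===== SOURCE A (Python) =====
-- from collections import Counter, deque
--
-- def create_layers(width, height, data):
--     layers = []
--     q = deque(data)
--     for _ in range(len(data) // (width * height)):
--         layer = []
--         layers.append(layer)
--         for i in range(height):
--             row = []
--             layer.append(row)
--             for j in range(width):
--                 row.append(q.popleft())
--
--     return layers
-- ===== SOURCE B (Python) =====
-- def create_layers(width, height, data):
--     d = list(data)
--     layer_size = width * height
--     n_layers = len(d) // layer_size
--     return [[d[k * layer_size + i * width: k * layer_size + i * width + width]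
--              for i in range(height)]
--             for k in range(n_layers)]
-- ===== Notes on version B (the rewrite author's own statement) =====
-- stated objective: simpler
-- what changed: Replaces the deque with element-by-element popleft in three nested loops by computed-offset slicing: each row is one slice d[base : base+width], built in a nested comprehension.
import Mathlib
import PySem

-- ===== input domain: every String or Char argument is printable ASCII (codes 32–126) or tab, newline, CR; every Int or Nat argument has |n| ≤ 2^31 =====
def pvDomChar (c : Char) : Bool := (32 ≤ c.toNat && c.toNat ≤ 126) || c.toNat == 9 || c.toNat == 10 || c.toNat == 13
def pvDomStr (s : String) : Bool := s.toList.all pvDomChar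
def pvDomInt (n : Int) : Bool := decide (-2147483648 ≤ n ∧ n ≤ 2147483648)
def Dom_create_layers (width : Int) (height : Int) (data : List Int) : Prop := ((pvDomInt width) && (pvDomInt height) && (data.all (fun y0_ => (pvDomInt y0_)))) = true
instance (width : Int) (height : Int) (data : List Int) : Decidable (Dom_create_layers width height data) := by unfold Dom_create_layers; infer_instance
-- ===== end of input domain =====

-- B replaces A's deque popping in three nested loops by computed-offset row slices (objective: simpler).

-- ===== PORT A =====
-- inner loop `for j in range(width): row.append(q.popleft())`
-- (q.popleft() ported as head/tail; on every admitted input the queue is nonempty at each pop)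
def clA_row : Nat → List Int → List Int × List Int
  | 0, q => ([], q)
  | Nat.succ j, q =>
      match q with
      | [] => ([], [])  -- q.popleft() on an empty deque raises IndexError; unreachable on admitted inputs
      | x :: q' =>
          let (r, q'') := clA_row j q'
          (x :: r, q'')

-- middle loop `for i in range(height)`
def clA_layer : Nat → Nat → List Int → List (List Int) × List Int
  | 0, _, q => ([], q)
  | Nat.succ i, wn, q =>
      let (row, q1) := clA_row wn q
      let (rest, q2) := clA_layer i wn q1
      (row :: rest, q2)

-- outer loop `for _ in range(len(data) // (width * height))`
def clA_layers : Nat → Nat → Nat → List Int → List (List (List Int)) × List Int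
  | 0, _, _, q => ([], q)
  | Nat.succ k, hn, wn, q =>
      let (layer, q1) := clA_layer hn wn q
      let (rest, q2) := clA_layers k hn wn q1
      (layer :: rest, q2)

def create_layers (width : Int) (height : Int) (data : List Int) : List (List (List Int)) :=
  (clA_layers (PySem.Int.floordiv (data.length : Int) (width * height)).toNat
      height.toNat width.toNat data).1

-- ===== PORT B =====
def create_layers_alt (width : Int) (height : Int) (data : List Int) : List (List (List Int)) :=
  let d := data
  let layer_size := width * height
  let n_layers := PySem.Int.floordiv (d.length : Int) layer_size
  (List.range n_layers.toNat).map (fun (k : Nat) =>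
    (List.range height.toNat).map (fun (i : Nat) =>
      PySem.List.slice d (some ((k : Int) * layer_size + (i : Int) * width))
                         (some ((k : Int) * layer_size + (i : Int) * width + width))))

-- ===== PRECONDITION & SPEC =====
-- Pre_ excludes width*height = 0, where Python A raises ZeroDivisionError (B raises too).
def Pre_create_layers (width : Int) (height : Int) (data : List Int) : Prop := width * height ≠ 0
instance (width : Int) (height : Int) (data : List Int) : Decidable (Pre_create_layers width height data) := by unfold Pre_create_layers; infer_instance
def pvWitness_create_layers : Int × Int × List Int := (2, 2, [1, 2, 3, 4, 5, 6, 7, 8])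

def Spec_create_layers (width : Int) (height : Int) (data : List Int) (out : List (List (List Int))) : Prop := out = create_layers_alt width height data
instance (width : Int) (height : Int) (data : List Int) (out : List (List (List Int))) : Decidable (Spec_create_layers width height data out) := by unfold Spec_create_layers; infer_instance

-- ===== CLAIM (what is proved, stated in full; the proofs are below) =====
def Claim_equal_create_layers : Prop := ∀ (width : Int) (height : Int) (data : List Int), Dom_create_layers width height data → Pre_create_layers width height data → Spec_create_layers width height data (create_layers width height data)

-- ===== LEMMAS AND PROOFS =====

theorem clA_row_eq (wn : Nat) : ∀ q : List Int, clA_row wn q = (q.take wn, q.drop wn) := by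
  induction wn with
  | zero => intro q; simp [clA_row]
  | succ j ih =>
      intro q
      cases q with
      | nil => simp [clA_row]
      | cons a q => simp [clA_row, ih]

theorem clA_layer_eq (hn wn : Nat) : ∀ q : List Int,
    clA_layer hn wn q =
      ((List.range hn).map (fun i => ((q.drop (i * wn)).take wn)), q.drop (hn * wn)) := by
  induction hn with
  | zero => intro q; simp [clA_layer]
  | succ i ih =>
      intro q
      simp only [clA_layer, clA_row_eq, ih, List.range_succ_eq_map, List.map_cons,
        List.map_map, List.drop_drop, Prod.mk.injEq, List.cons.injEq]
      refine ⟨⟨by simp, List.map_congr_left ?_⟩, ?_⟩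
      · intro a _
        try simp only [Function.comp]
        congr 2
        simp [Nat.succ_eq_add_one, Nat.mul_add, Nat.add_mul, Nat.mul_comm, Nat.add_comm, Nat.add_left_comm, Nat.mul_left_comm, Nat.add_assoc, Nat.mul_assoc]
      · congr 1
        simp [Nat.succ_eq_add_one, Nat.mul_add, Nat.add_mul, Nat.mul_comm, Nat.add_comm, Nat.add_left_comm, Nat.mul_left_comm, Nat.add_assoc, Nat.mul_assoc]

theorem clA_layers_eq (n hn wn : Nat) : ∀ q : List Int,
    clA_layers n hn wn q =
      ((List.range n).map (fun k =>
        (List.range hn).map (fun i => ((q.drop (k * (hn * wn) + i * wn)).take wn))),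
       q.drop (n * (hn * wn))) := by
  induction n with
  | zero => intro q; simp [clA_layers]
  | succ k ih =>
      intro q
      simp only [clA_layers, clA_layer_eq, ih, List.range_succ_eq_map, List.map_cons,
        List.map_map, List.drop_drop, Prod.mk.injEq, List.cons.injEq]
      refine ⟨⟨?_, List.map_congr_left ?_⟩, ?_⟩
      · apply List.map_congr_left
        intro b _
        congr 2
        simp [Nat.succ_eq_add_one, Nat.mul_add, Nat.add_mul, Nat.mul_comm, Nat.add_comm, Nat.add_left_comm, Nat.mul_left_comm, Nat.add_assoc, Nat.mul_assoc]
      · intro a _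
        apply List.map_congr_left
        intro b _
        try simp only [Function.comp]
        congr 2
        simp [Nat.succ_eq_add_one, Nat.mul_add, Nat.add_mul, Nat.mul_comm, Nat.add_comm, Nat.add_left_comm, Nat.mul_left_comm, Nat.add_assoc, Nat.mul_assoc]
      · congr 1
        simp [Nat.succ_eq_add_one, Nat.mul_add, Nat.add_mul, Nat.mul_comm, Nat.add_comm, Nat.add_left_comm, Nat.mul_left_comm, Nat.add_assoc, Nat.mul_assoc]

-- if len // ls > 0 then ls > 0 (len ≥ 0)
theorem pos_of_floordiv_pos (len : Nat) (ls : Int) (hls : ls ≠ 0)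
    (h : 0 < PySem.Int.floordiv (len : Int) ls) : 0 < ls := by
  by_contra hle
  push_neg at hle
  have hneg : ls < 0 := lt_of_le_of_ne hle hls
  have hmod := PySem.Int.mod_neg_bounds (a := (len : Int)) hneg
  have hdiv := PySem.Int.floordiv_mul_add_mod (len : Int) ls
  have h1 : PySem.Int.floordiv (len : Int) ls * ls ≤ 1 * ls := by
    apply mul_le_mul_of_nonpos_right (by omega) (le_of_lt hneg)
  have hlen : (0 : Int) ≤ (len : Int) := Int.natCast_nonneg len
  omega

theorem create_layers_eq (width height : Int) (data : List Int)
    (hpre : width * height ≠ 0) :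
    create_layers width height data = create_layers_alt width height data := by
  unfold create_layers create_layers_alt
  simp only []
  rw [clA_layers_eq]
  apply List.map_congr_left
  intro k hk
  apply List.map_congr_left
  intro i hi
  -- from membership: the layer count and height are positive, hence width*height > 0 and width > 0
  rw [List.mem_range] at hk hi
  have hnpos : 0 < PySem.Int.floordiv (data.length : Int) (width * height) := by omega
  have hls : 0 < width * height := pos_of_floordiv_pos data.length _ hpre hnpos
  have hh : 0 < height := by omega
  have hw : 0 < width := by
    rcases lt_trichotomy width 0 with h1 | h1 | h1
    · exfalso; nlinarith
    · exfalso; simp [h1] at hls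
    · exact h1
  -- rewrite the Int slice bounds as Nat casts
  set wn := width.toNat with hwn
  set hn := height.toNat with hhn
  have h1 : ((wn : Nat) : Int) = width := Int.toNat_of_nonneg (le_of_lt hw)
  have h2 : ((hn : Nat) : Int) = height := Int.toNat_of_nonneg (le_of_lt hh)
  have hcast : (k : Int) * (width * height) + (i : Int) * width
      = ((k * (hn * wn) + i * wn : Nat) : Int) := by
    push_cast
    rw [h1, h2]
    ring
  rw [hcast, ← h1, PySem.List.slice_natCast_add]

-- ===== VERDICT (by name: the statement is the Claim_ definition above) =====
theorem create_layers_spec : Claim_equal_create_layers := by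
  intro width height data _ hpre
  exact create_layers_eq width height data hpre
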